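-- pv_equiv track=rewrite | github.com/ThomasvanEsch/Computer | Code_Thomas_van_Esch.py | get_band_buckets
-- ===== SOURCE A (Python) =====
-- def get_band_buckets(band):
--     buckets = {}
--     for doc_id in range(0,len(band)):
--         value = int(''.join(map(str, band[doc_id]))) # All the integers in the band I paste together to make unique name for
--         if value not in buckets:                     # bukcet, when there is a bucket with the same name add them together
--             buckets[value] = [doc_id]
--         else:
--             buckets[value].append(doc_id)
--     return buckets
-- ===== SOURCE B (Python) =====
-- def get_band_buckets(band):
--     keys = [int(''.join(map(str, row))) for row in band]
--     return {k: [i for i, k2 in enumerate(keys) if k2 == k] for k in dict.fromkeys(keys)}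
-- ===== Notes on version B (the rewrite author's own statement) =====
-- stated objective: alternative
-- what changed: A builds the dict in one pass appending doc_ids; B precomputes the key list once, deduplicates it with dict.fromkeys, and builds each bucket by a per-key comprehension over enumerate(keys).
import Mathlib
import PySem

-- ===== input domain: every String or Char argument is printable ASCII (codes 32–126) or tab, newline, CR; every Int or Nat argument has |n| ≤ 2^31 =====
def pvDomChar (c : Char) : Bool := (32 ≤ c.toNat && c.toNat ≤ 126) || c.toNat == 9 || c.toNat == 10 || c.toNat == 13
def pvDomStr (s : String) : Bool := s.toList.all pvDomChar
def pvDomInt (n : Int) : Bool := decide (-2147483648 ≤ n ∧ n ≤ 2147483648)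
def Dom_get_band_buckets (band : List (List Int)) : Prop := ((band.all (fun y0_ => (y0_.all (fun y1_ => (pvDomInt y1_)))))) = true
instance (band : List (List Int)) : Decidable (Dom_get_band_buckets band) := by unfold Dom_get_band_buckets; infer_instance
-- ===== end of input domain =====

-- B replaces A's one-pass dict-append loop by precomputing the key list once, deduplicating it,
-- and gathering each bucket with a per-key comprehension (objective: alternative decomposition, same result).

-- shared helper: value = int(''.join(map(str, row)))   (both Pythons contain this exact expression;
-- getD 0 is the total form — Pre_ excludes exactly the inputs where int(...) raises ValueError)
def pvKey (row : List Int) : Int :=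
  (PySem.Int.ofChars? ((row.map PySem.Int.toChars).flatten)).getD 0

-- ===== PORT A =====
def get_band_buckets (band : List (List Int)) : List (Int × List Int) :=
  ((PySem.List.pyRange 0 (band.length : Int) 1).foldl
    (fun buckets doc_id =>
      let value := pvKey (PySem.List.pyGetD band doc_id [])
      if buckets.contains value = false then buckets.insert value [doc_id]
      else buckets.modify value [] (fun l => l ++ [doc_id]))
    PySem.Dict.empty).items

-- ===== PORT B =====
def get_band_buckets_alt (band : List (List Int)) : List (Int × List Int) :=
  let keys := band.map pvKey
  (PySem.List.dedup keys).map (fun k =>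
    (k, ((PySem.List.enumerate keys).filter (fun p => p.2 == k)).map (fun p => p.1)))

-- ===== PRECONDITION & SPEC =====
-- Pre_ = exactly the inputs where A's int(''.join(map(str, row))) returns: every row is nonempty
-- (int('') raises ValueError) and has no negative entry after the first (a '-' inside the
-- concatenated digits raises ValueError).
def Pre_get_band_buckets (band : List (List Int)) : Prop :=
  (band.all (fun row => !row.isEmpty && row.tail.all (fun x => decide (0 ≤ x)))) = true
instance (band : List (List Int)) : Decidable (Pre_get_band_buckets band) := by
  unfold Pre_get_band_buckets; infer_instance

def pvWitness_get_band_buckets : List (List Int) := [[1, 2], [12], [-3, 4], [1, 2]]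

def Spec_get_band_buckets (band : List (List Int)) (out : List (Int × List Int)) : Prop := out = get_band_buckets_alt band
instance (band : List (List Int)) (out : List (Int × List Int)) : Decidable (Spec_get_band_buckets band out) := by unfold Spec_get_band_buckets; infer_instance

-- ===== CLAIM (what is proved, stated in full; the proofs are below) =====
def Claim_equal_get_band_buckets : Prop := ∀ (band : List (List Int)), Dom_get_band_buckets band → Pre_get_band_buckets band → Spec_get_band_buckets band (get_band_buckets band)

-- ===== LEMMAS AND PROOFS =====

theorem pv_enumerate_append {α : Type} (xs ys : List α) (s : Int) :
    PySem.List.enumerate (xs ++ ys) s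
      = PySem.List.enumerate xs s ++ PySem.List.enumerate ys (s + xs.length) := by
  induction xs generalizing s with
  | nil => simp [PySem.List.enumerate_nil]
  | cons x xs ih =>
      simp [PySem.List.enumerate_cons, ih (s + 1)]
      ring_nf

theorem pv_enumerate_map {α β : Type} (f : α → β) (xs : List α) (s : Int) :
    PySem.List.enumerate (xs.map f) s
      = (PySem.List.enumerate xs s).map (fun p => (p.1, f p.2)) := by
  induction xs generalizing s with
  | nil => simp [PySem.List.enumerate_nil]
  | cons x xs ih => simp [PySem.List.enumerate_cons, ih (s + 1)]

-- the index loop 'for i in range(0, len(xs)): … i … xs[i] …' is a fold over enumerate(xs)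
theorem pv_foldl_idx {α β : Type} (xs : List α) (g : β → Int → α → β) (init : β) (dflt : α) :
    (PySem.List.pyRange 0 (xs.length : Int) 1).foldl
        (fun d i => g d i (PySem.List.pyGetD xs i dflt)) init
      = (PySem.List.enumerate xs 0).foldl (fun d p => g d p.1 p.2) init := by
  induction xs using List.reverseRecOn generalizing init with
  | nil => simp [PySem.List.pyRange_one_eq_nil, PySem.List.enumerate_nil]
  | append_singleton xs x ih =>
      have hlen : ((xs ++ [x]).length : Int) = (xs.length : Int) + 1 := by
        simp
      rw [hlen, PySem.List.pyRange_one_succ_right (by positivity),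
          List.foldl_append, pv_enumerate_append, List.foldl_append]
      have hpref :
          (PySem.List.pyRange 0 (xs.length : Int) 1).foldl
              (fun d i => g d i (PySem.List.pyGetD (xs ++ [x]) i dflt)) init
            = (PySem.List.pyRange 0 (xs.length : Int) 1).foldl
              (fun d i => g d i (PySem.List.pyGetD xs i dflt)) init := by
        apply PySem.List.foldl_congr_mem
        intro acc i hi
        rw [PySem.List.mem_pyRange_one] at hi
        have h1 : PySem.List.pyGetD (xs ++ [x]) i dflt = PySem.List.pyGetD xs i dflt := by
          rw [PySem.List.pyGetD_eq_getElem (xs ++ [x]) dflt hi.1 (by omega),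
              PySem.List.pyGetD_eq_getElem xs dflt hi.1 (by omega)]
          exact List.getElem_append_left (by omega)
        rw [h1]
      rw [hpref, ih]
      have hx : PySem.List.pyGetD (xs ++ [x]) (xs.length : Int) dflt = x := by
        rw [PySem.List.pyGetD_natCast]
        simp [List.getD]
      simp [PySem.List.enumerate_cons, PySem.List.enumerate_nil, hx]

-- A's two branches are one Python statement: buckets[value] = buckets.get(value, []) + [doc_id]
theorem pv_step_eq (d : PySem.Dict Int (List Int)) (v : Int) (i : Int) :
    (if d.contains v = false then d.insert v [i]
     else d.modify v [] (fun l => l ++ [i]))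
      = d.modify v [] (fun l => l ++ [i]) := by
  by_cases h : d.contains v = false
  · simp [h, PySem.Dict.modify, PySem.Dict.getD_of_not_contains d [] h]
  · simp [h]

theorem pv_main (band : List (List Int)) :
    get_band_buckets band = get_band_buckets_alt band := by
  unfold get_band_buckets get_band_buckets_alt
  rw [pv_foldl_idx band (fun d i v =>
        if d.contains (pvKey v) = false then d.insert (pvKey v) [i]
        else d.modify (pvKey v) [] (fun l => l ++ [i])) PySem.Dict.empty []]
  simp only [pv_step_eq]
  -- reshape the fold into the library's (key, value)-pair shape
  have hfold :
      (PySem.List.enumerate band 0).foldl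
          (fun d p => d.modify (pvKey p.2) [] (fun l => l ++ [p.1])) PySem.Dict.empty
        = ((PySem.List.enumerate band 0).map (fun p => (pvKey p.2, p.1))).foldl
          (fun d p => d.modify p.1 [] (fun l => l ++ [p.2])) PySem.Dict.empty := by
    rw [List.foldl_map]
  rw [hfold]
  set l := (PySem.List.enumerate band 0).map (fun p => (pvKey p.2, p.1)) with hl
  set D := l.foldl (fun d p => d.modify p.1 [] (fun l => l ++ [p.2])) PySem.Dict.empty with hD
  have hkeys : D.keys = PySem.Set.ofList (band.map pvKey) := by
    rw [hD, PySem.Dict.keys_foldl_modify_key l (fun p => p.1) [] (fun d p => fun v => v ++ [p.2])]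
    rw [PySem.Dict.keys_empty, PySem.Set.update_nil_left, hl]
    congr 1
    rw [List.map_map]
    conv_rhs => rw [← PySem.List.map_snd_enumerate band 0, List.map_map]
    rfl
  have hnodup : D.keys.Nodup := by
    rw [hD]
    exact PySem.Dict.nodup_keys_foldl_modify_key l (fun p => p.1) [] _ _ PySem.Dict.nodup_keys_empty
  have hgetD : ∀ k : Int, D.getD k [] =
      ((PySem.List.enumerate band 0).filter (fun p => pvKey p.2 == k)).map (fun p => p.1) := by
    intro k
    rw [hD, PySem.Dict.getD_foldl_modify_append l PySem.Dict.empty k]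
    rw [PySem.Dict.getD_empty, List.nil_append, hl, List.filter_map, List.map_map]
    rfl
  rw [PySem.Dict.items_eq_map_keys D hnodup [], hkeys]
  have hval : ∀ k : Int,
      ((PySem.List.enumerate (band.map pvKey)).filter (fun p => p.2 == k)).map (fun p => p.1)
        = ((PySem.List.enumerate band 0).filter (fun p => pvKey p.2 == k)).map (fun p => p.1) := by
    intro k
    rw [pv_enumerate_map, List.filter_map, List.map_map]
    rfl
  simp only [PySem.List.dedup]
  apply List.map_congr_left
  intro k _
  rw [hgetD k, hval k]

-- ===== VERDICT (by name: the statement is the Claim_ definition above) =====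
theorem get_band_buckets_spec : Claim_equal_get_band_buckets := by
  intro band _ _
  unfold Spec_get_band_buckets
  exact pv_main band
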